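-- pv_equiv track=rewrite | github.com/MarkSon-42/Team_ALGO | minwoo/_Level_02_Normal/_0808_방문 길이(failed).py | solution
-- ===== SOURCE A (Python) =====
-- def solution(dirs):
--     answer = 0
--     # 좌표평면의 시작위치 설정
--     # map_arr = [[(0,0) for j in range(5)] for i in range(5)]
--     road_list = []  # 지나간 길을 넣어주고 추후에 set()으로 중복처리할 것임
--     loc = (0, 0)
--     for i in range(len(dirs)):
--         if dirs[i] == 'U':
--             loc = (loc[0] + 1, loc[1])
--             road_list.append(loc)
--         if dirs[i] == 'D':
--             loc = (loc[0] - 1, loc[1])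
--             road_list.append(loc)
--         if dirs[i] == 'L':
--             loc = (loc[0], loc[1] - 1)
--             road_list.append(loc)
--         if dirs[i] == 'R':
--             loc = (loc[0], loc[1] + 1)
--             road_list.append(loc)
--
--     return road_list  # 여기에 set()으로 중복 날리고, abs() > 6도 전부 쳐내면 됨.
-- ===== SOURCE B (Python) =====
-- def solution(dirs):
--     moves = [c for c in dirs if c in 'UDLR']
--     return [(moves[:i + 1].count('U') - moves[:i + 1].count('D'),
--              moves[:i + 1].count('R') - moves[:i + 1].count('L'))
--             for i in range(len(moves))]
-- ===== Notes on version B (the rewrite author's own statement) =====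
-- stated objective: alternative
-- what changed: B keeps no running position at all: it filters the valid moves and computes each visited position independently as the net letter counts (U minus D, R minus L) over the prefix of moves, trading A's single stateful accumulation loop for a per-prefix counting formulation.
import Mathlib
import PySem

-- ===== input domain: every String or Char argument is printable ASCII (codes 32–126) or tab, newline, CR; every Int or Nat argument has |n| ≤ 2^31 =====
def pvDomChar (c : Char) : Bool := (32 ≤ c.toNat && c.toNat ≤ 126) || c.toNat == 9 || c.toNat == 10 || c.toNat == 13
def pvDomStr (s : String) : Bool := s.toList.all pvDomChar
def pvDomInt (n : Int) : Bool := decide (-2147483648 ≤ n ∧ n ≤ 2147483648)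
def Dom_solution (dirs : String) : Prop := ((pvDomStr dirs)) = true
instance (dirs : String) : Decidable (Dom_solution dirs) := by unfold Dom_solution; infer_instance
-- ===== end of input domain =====

-- B replaces A's stateful accumulation loop by a per-prefix letter-count formulation
-- (each visited position computed independently); objective: alternative, not faster.

-- ===== PORT A =====
-- one iteration of A's loop body: four sequential `if dirs[i] == …` blocks over the
-- mutable state (loc, road_list); each checks the SAME character, transliterated in order
def solutionStep (st : (Int × Int) × List (Int × Int)) (c : Char) :
    (Int × Int) × List (Int × Int) :=
  let st := if c = 'U' then
      let loc := (st.1.1 + 1, st.1.2); (loc, st.2 ++ [loc]) else st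
  let st := if c = 'D' then
      let loc := (st.1.1 - 1, st.1.2); (loc, st.2 ++ [loc]) else st
  let st := if c = 'L' then
      let loc := (st.1.1, st.1.2 - 1); (loc, st.2 ++ [loc]) else st
  let st := if c = 'R' then
      let loc := (st.1.1, st.1.2 + 1); (loc, st.2 ++ [loc]) else st
  st

def solution (dirs : String) : List (Int × Int) :=
  -- `for i in range(len(dirs)): … dirs[i] …` visits exactly the characters in order
  (dirs.toList.foldl solutionStep ((0, 0), [])).2

-- ===== PORT B =====
-- Source B: moves = [c for c in dirs if c in 'UDLR']  (membership in the 4-char string)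
def bMoves (dirs : String) : List Char :=
  dirs.toList.filter (fun c => ("UDLR".toList).contains c)

-- Source B: one list element — net letter counts over the prefix moves[:i+1]
def bPos (moves : List Char) (i : Nat) : Int × Int :=
  (((moves.take (i + 1)).count 'U' : Int) - ((moves.take (i + 1)).count 'D' : Int),
   ((moves.take (i + 1)).count 'R' : Int) - ((moves.take (i + 1)).count 'L' : Int))

def solution_alt (dirs : String) : List (Int × Int) :=
  let moves := bMoves dirs
  (List.range moves.length).map (bPos moves)

-- ===== PRECONDITION & SPEC =====
def Spec_solution (dirs : String) (out : List (Int × Int)) : Prop := out = solution_alt dirs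
instance (dirs : String) (out : List (Int × Int)) : Decidable (Spec_solution dirs out) := by unfold Spec_solution; infer_instance

-- ===== CLAIM (what is proved, stated in full; the proofs are below) =====
def Claim_equal_solution : Prop := ∀ (dirs : String), Dom_solution dirs → Spec_solution dirs (solution dirs)

-- ===== LEMMAS AND PROOFS =====
-- non-move characters leave A's state unchanged, so folding over the filtered list agrees
theorem foldl_filter_step (cs : List Char) :
    ∀ st, cs.foldl solutionStep st
      = (cs.filter (fun c => ("UDLR".toList).contains c)).foldl solutionStep st := by
  induction cs with
  | nil => intro st; rfl
  | cons c cs ih =>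
    intro st
    by_cases h : ("UDLR".toList).contains c = true
    · rw [List.foldl_cons, List.filter_cons_of_pos h, List.foldl_cons]
      exact ih _
    · have hU : c ≠ 'U' := by intro hc; subst hc; simp at h
      have hD : c ≠ 'D' := by intro hc; subst hc; simp at h
      have hL : c ≠ 'L' := by intro hc; subst hc; simp at h
      have hR : c ≠ 'R' := by intro hc; subst hc; simp at h
      have hstep : solutionStep st c = st := by simp [solutionStep, hU, hD, hL, hR]
      rw [List.foldl_cons, List.filter_cons_of_neg h, hstep]
      exact ih st

-- the accumulation invariant: A's fold over a list of pure moves produces exactly the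
-- shifted prefix-count positions
theorem foldl_step_counts (ms : List Char)
    (hm : ∀ c ∈ ms, ("UDLR".toList).contains c = true) :
    ∀ (x y : Int) (acc : List (Int × Int)),
      (ms.foldl solutionStep ((x, y), acc)).2
        = acc ++ (List.range ms.length).map (fun i =>
            (x + ((ms.take (i + 1)).count 'U' : Int) - ((ms.take (i + 1)).count 'D' : Int),
             y + ((ms.take (i + 1)).count 'R' : Int) - ((ms.take (i + 1)).count 'L' : Int))) := by
  induction ms with
  | nil => intro x y acc; simp
  | cons c ms ih =>
    intro x y acc
    have hc := hm c (List.mem_cons_self ..)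
    have hms : ∀ d ∈ ms, ("UDLR".toList).contains d = true :=
      fun d hd => hm d (List.mem_cons_of_mem _ hd)
    have hrange : List.range (ms.length + 1)
        = 0 :: (List.range ms.length).map Nat.succ := by
      simp [List.range_succ_eq_map]
    have hc' : c = 'U' ∨ c = 'D' ∨ c = 'L' ∨ c = 'R' := by
      simpa using hc
    rcases hc' with hc' | hc' | hc' | hc' <;> subst hc' <;>
      · simp only [List.foldl_cons]
        simp [solutionStep, hrange, List.map_map]
        rw [ih hms]
        simp only [List.append_assoc, List.singleton_append]
        refine congrArg _ (congrArg _ ?_)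
        apply List.map_congr_left
        intro i _
        refine Prod.ext ?_ ?_ <;> (simp [Function.comp]; try omega)

-- ===== VERDICT (by name: the statement is the Claim_ definition above) =====
theorem solution_spec : Claim_equal_solution := by
  intro dirs _
  unfold Spec_solution solution solution_alt bMoves bPos
  rw [foldl_filter_step]
  rw [foldl_step_counts _ (by intro c hc; exact (List.mem_filter.mp hc).2)]
  simp only [List.nil_append]
  apply List.map_congr_left
  intro i _
  simp
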